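-- pv_equiv track=rewrite | github.com/rhmvvCYB3R/CSA_SCRIPTS | Conversions(L2).py | decimal_to_bcd
-- ===== SOURCE A (Python) =====
-- def decimal_to_bcd(decimal: int) -> str:
--     if decimal < 0:
--         raise ValueError("BCD supports only non-negative integers")
--     decimal_str = str(decimal)
--     bcd_str = ""
--     for digit in decimal_str:
--         val = int(digit)
--         bcd_str += format(val, '04b')
--     return bcd_str
-- ===== SOURCE B (Python) =====
-- def decimal_to_bcd(decimal: int) -> str:
--     if decimal < 0:
--         raise ValueError("BCD supports only non-negative integers")
--     if decimal == 0:
--         return '0000'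
--     groups = []
--     n = decimal
--     while n:
--         n, d = divmod(n, 10)
--         groups.append(format(d, '04b'))
--     groups.reverse()
--     return ''.join(groups)
-- ===== Notes on version B (the rewrite author's own statement) =====
-- stated objective: alternative
-- what changed: B extracts decimal digits arithmetically with a divmod loop (least-significant first, then reverses the 4-bit groups) instead of converting the integer to a string and iterating its characters.
import Mathlib
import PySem

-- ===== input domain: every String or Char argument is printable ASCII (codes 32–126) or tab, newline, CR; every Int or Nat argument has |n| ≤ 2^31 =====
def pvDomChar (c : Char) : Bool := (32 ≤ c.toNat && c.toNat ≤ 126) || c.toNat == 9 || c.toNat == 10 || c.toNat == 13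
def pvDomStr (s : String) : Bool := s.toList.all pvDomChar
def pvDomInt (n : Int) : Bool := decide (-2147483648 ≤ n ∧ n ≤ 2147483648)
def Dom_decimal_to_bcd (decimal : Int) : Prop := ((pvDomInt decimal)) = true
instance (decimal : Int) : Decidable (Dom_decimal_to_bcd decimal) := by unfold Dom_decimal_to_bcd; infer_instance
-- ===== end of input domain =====

-- B extracts decimal digits arithmetically with a divmod loop (LSD first, then reverses
-- the 4-bit groups) instead of iterating the characters of str(decimal); alternative algorithm, same cost.


-- format(v, '04b'): binary digits zero-padded on the left to width 4; exact for 0 ≤ v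
-- (both Pythons call this builtin, only on digit values 0..9)
def fmt04b (v : Int) : List Char :=
  List.replicate (4 - (PySem.Int.toBinChars v).length) '0' ++ PySem.Int.toBinChars v

-- ===== PORT A =====
-- the 'decimal < 0' raise is excluded by Pre_; under Pre_ every char of str(decimal) is a
-- digit, so int(digit) = (ofChars? [c]).getD 0 never takes the default
def decimal_to_bcd (decimal : Int) : String :=
  let ds := PySem.Int.toChars decimal
  String.ofList (ds.foldl (fun acc c => acc ++ fmt04b ((PySem.Int.ofChars? [c]).getD 0)) [])

-- ===== PORT B =====
-- the 'while n:' loop of Source B, collecting groups LSD-first; the loop variable stays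
-- nonnegative under Pre_, the guard is written 'n ≤ 0' only for termination
def bGroups (n : Int) : List (List Char) :=
  if _h : n ≤ 0 then []
  else fmt04b (PySem.Int.mod n 10) :: bGroups (PySem.Int.floordiv n 10)
termination_by n.toNat
decreasing_by
  rw [PySem.Int.floordiv_eq_ediv_of_pos (by omega)]
  omega

def decimal_to_bcd_alt (decimal : Int) : String :=
  if decimal = 0 then "0000"
  else String.ofList ((bGroups decimal).reverse.flatten)

-- ===== PRECONDITION & SPEC =====
-- Pre_ excludes decimal < 0, where A (and B) raise ValueError
def Pre_decimal_to_bcd (decimal : Int) : Prop := 0 ≤ decimal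
instance (decimal : Int) : Decidable (Pre_decimal_to_bcd decimal) := by unfold Pre_decimal_to_bcd; infer_instance
def pvWitness_decimal_to_bcd : Int := (105)

def Spec_decimal_to_bcd (decimal : Int) (out : String) : Prop := out = decimal_to_bcd_alt decimal
instance (decimal : Int) (out : String) : Decidable (Spec_decimal_to_bcd decimal out) := by unfold Spec_decimal_to_bcd; infer_instance

-- ===== CLAIM (what is proved, stated in full; the proofs are below) =====
def Claim_equal_decimal_to_bcd : Prop := ∀ (decimal : Int), Dom_decimal_to_bcd decimal → Pre_decimal_to_bcd decimal → Spec_decimal_to_bcd decimal (decimal_to_bcd decimal)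

-- ===== LEMMAS AND PROOFS =====

-- decimal digits of m, least significant first (proof-side common spec)
def digitsRev (m : Nat) : List Nat :=
  if h : m = 0 then [] else m % 10 :: digitsRev (m / 10)
termination_by m
decreasing_by exact Nat.div_lt_self (Nat.pos_of_ne_zero h) (by omega)

lemma digitsRev_lt (m : Nat) : ∀ d ∈ digitsRev m, d < 10 := by
  induction m using Nat.strong_induction_on with
  | _ m ih =>
    intro d hd
    by_cases h : m = 0
    · subst h; rw [digitsRev] at hd; simp at hd
    · rw [digitsRev, dif_neg h] at hd
      rcases List.mem_cons.mp hd with h' | h'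
      · subst h'; exact Nat.mod_lt _ (by omega)
      · exact ih (m / 10) (Nat.div_lt_self (Nat.pos_of_ne_zero h) (by omega)) d h'

lemma toDigitsCore_step (fuel m : Nat) (acc : List Char) :
    Nat.toDigitsCore 10 (fuel + 1) m acc =
      (if m / 10 = 0 then Nat.digitChar (m % 10) :: acc
       else Nat.toDigitsCore 10 fuel (m / 10) (Nat.digitChar (m % 10) :: acc)) := by
  rw [Nat.toDigitsCore]

lemma toDigitsCore_spec : ∀ (fuel m : Nat) (acc : List Char), 0 < m → m ≤ fuel →
    Nat.toDigitsCore 10 fuel m acc = (digitsRev m).reverse.map Nat.digitChar ++ acc := by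
  intro fuel
  induction fuel with
  | zero => intro m acc h1 h2; omega
  | succ fuel ih =>
    intro m acc h1 h2
    rw [toDigitsCore_step]
    by_cases h : m / 10 = 0
    · rw [if_pos h, digitsRev, dif_neg (by omega), digitsRev, dif_pos h]
      simp
    · rw [if_neg h, ih (m / 10) _ (Nat.pos_of_ne_zero h)
        (by have := Nat.div_lt_self h1 (show 1 < 10 by omega); omega)]
      conv_rhs => rw [digitsRev, dif_neg (show ¬ m = 0 by omega)]
      simp

lemma toDigits_spec (m : Nat) (h : 0 < m) :
    Nat.toDigits 10 m = (digitsRev m).reverse.map Nat.digitChar :=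
  (toDigitsCore_spec (m + 1) m [] h (by omega)).trans (by simp)

-- int(str-digit) round trip: the per-char value A computes, for a decimal digit char
lemma val_digitChar (d : Nat) (h : d < 10) :
    (PySem.Int.ofChars? [Nat.digitChar d]).getD 0 = (d : Int) := by
  interval_cases d <;> decide

lemma bGroups_spec (m : Nat) :
    bGroups (m : Int) = (digitsRev m).map (fun d : Nat => fmt04b (d : Int)) := by
  induction m using Nat.strong_induction_on with
  | _ m ih =>
    by_cases h : m = 0
    · subst h
      simp [bGroups, digitsRev]
    · rw [bGroups, digitsRev,
        dif_neg (show ¬ (m : Int) ≤ 0 by exact_mod_cast not_le.mpr (Nat.pos_of_ne_zero h)),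
        dif_neg h]
      rw [show PySem.Int.mod (m : Int) 10 = ((m % 10 : Nat) : Int) from by
            exact_mod_cast PySem.Int.mod_natCast m 10,
          show PySem.Int.floordiv (m : Int) 10 = ((m / 10 : Nat) : Int) from by
            exact_mod_cast PySem.Int.floordiv_natCast m 10,
          ih (m / 10) (Nat.div_lt_self (Nat.pos_of_ne_zero h) (by omega)), List.map_cons]

-- per-element agreement lifted over a digit list
lemma map_val_digitChar (l : List Nat) (h : ∀ d ∈ l, d < 10) :
    (l.map Nat.digitChar).map (fun c => fmt04b ((PySem.Int.ofChars? [c]).getD 0)) =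
      l.map (fun d : Nat => fmt04b (d : Int)) := by
  rw [List.map_map]
  exact List.map_congr_left (fun d hd => by
    simp only [Function.comp]; rw [val_digitChar d (h d hd)])

-- ===== VERDICT (by name: the statement is the Claim_ definition above) =====
theorem decimal_to_bcd_spec : Claim_equal_decimal_to_bcd := by
  intro decimal _ hpre
  unfold Spec_decimal_to_bcd decimal_to_bcd decimal_to_bcd_alt
  by_cases h0 : decimal = 0
  · subst h0; decide
  · rw [if_neg h0]
    have hm : decimal = ((decimal.toNat : Nat) : Int) := by
      unfold Pre_decimal_to_bcd at hpre; omega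
    have hpos : 0 < decimal.toNat := by unfold Pre_decimal_to_bcd at hpre; omega
    rw [hm]
    simp only [PySem.Int.toChars, if_neg (by omega : ¬ ((decimal.toNat : Nat) : Int) < 0),
      Int.toNat_natCast]
    rw [toDigits_spec decimal.toNat hpos, bGroups_spec,
      PySem.List.foldl_append_eq_flatMap, List.nil_append, List.flatMap_def,
      map_val_digitChar _ (fun d hd => digitsRev_lt decimal.toNat d (List.mem_reverse.mp hd)),
      ← List.map_reverse]
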